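-- pv_equiv track=rewrite | github.com/iansedano/aoc | python/2015/21.py | get_kit_stats
-- ===== SOURCE A (Python) =====
-- def get_kit_stats(items):
--     stats = {"cost": 0, "damage": 0, "defense": 0}
--     for item in items:
--         stats = {
--             "cost": stats["cost"] + item[2],
--             "damage": stats["damage"] + item[3],
--             "defense": stats["defense"] + item[4],
--         }
--     return stats
-- ===== SOURCE B (Python) =====
-- def get_kit_stats(items):
--     items = list(items)
--     return {
--         "cost": sum(item[2] for item in items),
--         "damage": sum(item[3] for item in items),
--         "defense": sum(item[4] for item in items),
--     }
-- ===== Notes on version B (the rewrite author's own statement) =====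
-- stated objective: idiomatic
-- what changed: Replaces the fused loop that rebuilds a fresh dict every iteration with three independent field-wise sum() reductions returned in one dict literal.
import Mathlib
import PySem

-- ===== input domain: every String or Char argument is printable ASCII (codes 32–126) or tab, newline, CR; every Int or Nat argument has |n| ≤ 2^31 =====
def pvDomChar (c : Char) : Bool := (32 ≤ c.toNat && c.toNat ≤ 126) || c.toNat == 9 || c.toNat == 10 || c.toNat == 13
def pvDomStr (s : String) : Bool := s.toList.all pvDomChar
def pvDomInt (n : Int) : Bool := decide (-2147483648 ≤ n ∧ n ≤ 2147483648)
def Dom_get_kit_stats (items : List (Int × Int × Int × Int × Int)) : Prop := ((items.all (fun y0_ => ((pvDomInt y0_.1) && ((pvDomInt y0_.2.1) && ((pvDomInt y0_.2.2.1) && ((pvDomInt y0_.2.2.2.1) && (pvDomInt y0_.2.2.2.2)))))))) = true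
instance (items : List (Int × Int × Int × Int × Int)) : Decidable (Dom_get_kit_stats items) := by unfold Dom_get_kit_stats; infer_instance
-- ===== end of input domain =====

-- B replaces A's fused loop (rebuilding a fresh dict each iteration) with three independent field-wise sums; objective: idiomatic.

-- ===== PORT A =====
-- A: stats starts as {"cost":0,"damage":0,"defense":0}; each iteration builds a fresh
-- dict from lookups into the previous one. stats[k]: first-match lookup in the
-- association list; the keys are always present, so the default 0 is never taken.
def pyGetKey (stats : List (String × Int)) (k : String) : Int :=
  ((stats.find? (fun p => p.1 == k)).map Prod.snd).getD 0

def get_kit_stats (items : List (Int × Int × Int × Int × Int)) : List (String × Int) :=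
  items.foldl
    (fun stats item =>
      [("cost", pyGetKey stats "cost" + item.2.2.1),
       ("damage", pyGetKey stats "damage" + item.2.2.2.1),
       ("defense", pyGetKey stats "defense" + item.2.2.2.2)])
    [("cost", 0), ("damage", 0), ("defense", 0)]

-- ===== PORT B =====
def get_kit_stats_alt (items : List (Int × Int × Int × Int × Int)) : List (String × Int) :=
  [("cost", (items.map (fun item => item.2.2.1)).sum),
   ("damage", (items.map (fun item => item.2.2.2.1)).sum),
   ("defense", (items.map (fun item => item.2.2.2.2)).sum)]

-- ===== PRECONDITION & SPEC =====
def Spec_get_kit_stats (items : List (Int × Int × Int × Int × Int)) (out : List (String × Int)) : Prop := out = get_kit_stats_alt items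
instance (items : List (Int × Int × Int × Int × Int)) (out : List (String × Int)) : Decidable (Spec_get_kit_stats items out) := by unfold Spec_get_kit_stats; infer_instance

-- ===== CLAIM (what is proved, stated in full; the proofs are below) =====
def Claim_equal_get_kit_stats : Prop := ∀ (items : List (Int × Int × Int × Int × Int)), Dom_get_kit_stats items → Spec_get_kit_stats items (get_kit_stats items)

-- ===== LEMMAS AND PROOFS =====
theorem get_kit_stats_fold (items : List (Int × Int × Int × Int × Int)) (c d e : Int) :
    items.foldl
      (fun stats item =>
        [("cost", pyGetKey stats "cost" + item.2.2.1),
         ("damage", pyGetKey stats "damage" + item.2.2.2.1),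
         ("defense", pyGetKey stats "defense" + item.2.2.2.2)])
      [("cost", c), ("damage", d), ("defense", e)]
    = [("cost", c + (items.map (fun item => item.2.2.1)).sum),
       ("damage", d + (items.map (fun item => item.2.2.2.1)).sum),
       ("defense", e + (items.map (fun item => item.2.2.2.2)).sum)] := by
  induction items generalizing c d e with
  | nil => simp
  | cons x xs ih =>
    simp only [List.foldl_cons, List.map_cons, List.sum_cons]
    rw [show pyGetKey [("cost", c), ("damage", d), ("defense", e)] "cost" = c from rfl,
       show pyGetKey [("cost", c), ("damage", d), ("defense", e)] "damage" = d from rfl,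
       show pyGetKey [("cost", c), ("damage", d), ("defense", e)] "defense" = e from rfl,
       ih]
    simp [add_assoc]

-- ===== VERDICT (by name: the statement is the Claim_ definition above) =====
theorem get_kit_stats_spec : Claim_equal_get_kit_stats := by
  intro items _
  unfold Spec_get_kit_stats get_kit_stats get_kit_stats_alt
  rw [get_kit_stats_fold]
  simp
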